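-- pv_equiv track=rewrite | github.com/Seojeil/Algorithm | Python/백준/Bronze/2846. 오르막길/오르막길.py | uphill
-- ===== SOURCE A (Python) =====
-- def uphill(road):
--     start = road[0]
--     result = 0
--
--     for i, r in enumerate(road[1:]):
--         if road[i] >= r:
--             result = max(result, road[i] - start)
--             start = r
--     else:
--         result = max(result, road[-1] - start)
--
--     return result
-- ===== SOURCE B (Python) =====
-- def uphill(road):
--     prev = road[0]
--     result = 0
--     cur = 0
--     for r in road[1:]:
--         d = r - prev
--         cur = cur + d if d > 0 else 0
--         result = max(result, cur)
--         prev = r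
--     return result
-- ===== Notes on version B (the rewrite author's own statement) =====
-- stated objective: alternative
-- what changed: Kadane-style single pass over the difference array (accumulate positive steps, reset on non-ascending step, running max every step) instead of tracking the valley start element and subtracting only at run boundaries and at the end.
import Mathlib
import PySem

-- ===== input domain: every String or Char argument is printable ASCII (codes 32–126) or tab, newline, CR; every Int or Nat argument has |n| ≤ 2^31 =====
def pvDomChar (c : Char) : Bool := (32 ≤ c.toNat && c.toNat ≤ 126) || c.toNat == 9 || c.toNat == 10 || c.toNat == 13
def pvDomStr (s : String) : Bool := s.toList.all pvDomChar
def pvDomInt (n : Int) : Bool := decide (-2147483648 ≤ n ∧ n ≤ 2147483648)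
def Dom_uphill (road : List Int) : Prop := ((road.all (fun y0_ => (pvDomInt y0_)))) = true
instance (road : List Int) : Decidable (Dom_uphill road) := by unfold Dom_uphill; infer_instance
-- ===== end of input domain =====

-- B: Kadane-style pass over the difference array instead of valley-start tracking; return value equal on all nonempty roads.

-- ===== PORT A =====
-- body of A's loop: p = (i, r) from enumerate(road[1:]); road[i] looked up in the full list
def uphillStepA (road : List Int) (st : Int × Int) (p : Int × Int) : Int × Int :=
  if PySem.List.pyGetD road p.1 0 ≥ p.2 then
    (max st.1 (PySem.List.pyGetD road p.1 0 - st.2), p.2)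
  else st

def uphill (road : List Int) : Int :=
  let start := PySem.List.pyGetD road 0 0      -- road[0]; Pre_ guarantees the index is in range
  let s := (PySem.List.enumerate (PySem.List.slice road (some 1) none) 0).foldl
             (uphillStepA road) (0, start)
  max s.1 (PySem.List.pyGetD road (-1) 0 - s.2)   -- the for-else clause

-- ===== PORT B =====
-- state (result, cur, prev)
def uphillStepB (st : Int × Int × Int) (r : Int) : Int × Int × Int :=
  let d := r - st.2.2
  let cur := if d > 0 then st.2.1 + d else 0
  (max st.1 cur, cur, r)

def uphill_alt (road : List Int) : Int :=
  let prev := PySem.List.pyGetD road 0 0       -- road[0]; same IndexError point as A on []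
  let s := (PySem.List.slice road (some 1) none).foldl uphillStepB (0, 0, prev)
  s.1

-- ===== PRECONDITION & SPEC =====
-- Pre_ excludes only the empty list, on which Python A (and B) raise IndexError at road[0].
def Pre_uphill (road : List Int) : Prop := road ≠ []
instance (road : List Int) : Decidable (Pre_uphill road) := by unfold Pre_uphill; infer_instance
def pvWitness_uphill : List Int := ([1, 2, 1, 3])

def Spec_uphill (road : List Int) (out : Int) : Prop := out = uphill_alt road
instance (road : List Int) (out : Int) : Decidable (Spec_uphill road out) := by unfold Spec_uphill; infer_instance

-- ===== CLAIM (what is proved, stated in full; the proofs are below) =====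
def Claim_equal_uphill : Prop := ∀ (road : List Int), Dom_uphill road → Pre_uphill road → Spec_uphill road (uphill road)

-- ===== LEMMAS AND PROOFS =====

-- zip-pair form of A's loop body (the pair is (previous element, current element))
def uphillStepZ (st : Int × Int) (p : Int × Int) : Int × Int :=
  if p.1 ≥ p.2 then (max st.1 (p.1 - st.2), p.2) else st

theorem pyGetD_append_length (pre : List Int) (x : Int) (t : List Int) :
    PySem.List.pyGetD (pre ++ x :: t) (pre.length : Int) 0 = x := by
  simp [List.getD]

-- A's enumerate-with-global-index fold equals a fold over the list of adjacent pairs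
theorem foldA_eq_foldZ : ∀ (t pre : List Int) (x : Int) (st : Int × Int),
    (PySem.List.enumerate t (pre.length : Int)).foldl (uphillStepA (pre ++ x :: t)) st
      = (List.zip (x :: t) t).foldl uphillStepZ st := by
  intro t
  induction t with
  | nil => intro pre x st; simp [PySem.List.enumerate_nil]
  | cons r t' ih =>
    intro pre x st
    have h1 : pre ++ x :: r :: t' = (pre ++ [x]) ++ r :: t' := by simp
    have h2 : ((pre.length : Int) + 1) = (((pre ++ [x]).length : Int)) := by
      simp
    rw [PySem.List.enumerate_cons, List.foldl_cons, List.zip_cons_cons, List.foldl_cons]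
    have hb : uphillStepA (pre ++ x :: r :: t') st ((pre.length : Int), r)
        = uphillStepZ st (x, r) := by
      simp [uphillStepA, uphillStepZ, pyGetD_append_length pre x (r :: t')]
    rw [hb, h2, h1, ih]

-- the Kadane invariant: B's fold computes A's zip-fold result combined with the final max
theorem foldZ_eq_foldB : ∀ (t : List Int) (x ra start rb cur : Int),
    0 ≤ ra → cur = x - start → rb = max ra cur →
    (t.foldl uphillStepB (rb, cur, x)).1
      = max ((List.zip (x :: t) t).foldl uphillStepZ (ra, start)).1
          ((x :: t).getLast (by simp) - ((List.zip (x :: t) t).foldl uphillStepZ (ra, start)).2) := by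
  intro t
  induction t with
  | nil => intro x ra start rb cur h0 hc hr; simp [hr, hc]
  | cons r t' ih =>
    intro x ra start rb cur h0 hc hr
    rw [List.foldl_cons, List.zip_cons_cons, List.foldl_cons]
    have hlast : (x :: r :: t').getLast (by simp) = (r :: t').getLast (by simp) := by
      simp [List.getLast]
    by_cases hge : x ≥ r
    · have hz : uphillStepZ (ra, start) (x, r) = (max ra (x - start), r) := by
        simp [uphillStepZ, hge]
      have hb : uphillStepB (rb, cur, x) r = (rb, 0, r) := by
        simp [uphillStepB]
        constructor
        · omega
        · omega
      rw [hz, hb, hlast]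
      exact ih r (max ra (x - start)) r rb 0 (by omega) (by omega) (by omega)
    · have hz : uphillStepZ (ra, start) (x, r) = (ra, start) := by
        simp [uphillStepZ]; omega
      have hb : uphillStepB (rb, cur, x) r
          = (max ra (cur + (r - x)), cur + (r - x), r) := by
        simp [uphillStepB]
        constructor
        · omega
        · omega
      rw [hz, hb, hlast]
      exact ih r ra start (max ra (cur + (r - x))) (cur + (r - x)) h0 (by omega) rfl

-- ===== VERDICT (by name: the statement is the Claim_ definition above) =====
theorem uphill_spec : Claim_equal_uphill := by
  intro road _ hpre
  unfold Spec_uphill uphill uphill_alt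
  obtain ⟨h, t, rfl⟩ : ∃ h t, road = h :: t := by
    cases road with
    | nil => exact absurd rfl hpre
    | cons h t => exact ⟨h, t, rfl⟩
  simp only [PySem.List.slice_from_one, List.tail_cons, PySem.List.pyGetD_zero_cons]
  have hA := foldA_eq_foldZ t [] h (0, h)
  simp only [List.length_nil, Int.natCast_zero, List.nil_append] at hA
  rw [hA]
  rw [PySem.List.pyGetD_neg_one (h :: t) 0 (by simp)]
  exact (foldZ_eq_foldB t h 0 h 0 0 le_rfl (by omega) (by omega)).symm
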